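-- pv_equiv track=rewrite | github.com/yrevash/revvec | scripts/fetch.py | _pick_image_url
-- ===== SOURCE A (Python) =====
-- def _pick_image_url(urls: list[str], size: str, fallback: str) -> str:
--     """NASA Image Library asset manifest returns a list of variant URLs like
--     ...~thumb.jpg, ...~small.jpg, ...~medium.jpg, ...~large.jpg, ...~orig.jpg.
--     Pick the one matching size, with graceful fallback."""
--     markers = {
--         "thumb":  ["~thumb.jpg", "~thumb.png"],
--         "small":  ["~small.jpg", "~small.png"],
--         "medium": ["~medium.jpg", "~medium.png"],
--         "large":  ["~large.jpg", "~large.png"],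
--         "orig":   ["~orig.jpg", "~orig.png"],
--     }.get(size, ["~medium.jpg", "~medium.png"])
--     for m in markers:
--         for u in urls:
--             if u.endswith(m):
--                 return u
--     # Descending fallback if the requested size is absent
--     order = ["orig", "large", "medium", "small", "thumb"]
--     for alt in order[order.index(size):] if size in order else order:
--         for m in {
--             "thumb":  ["~thumb.jpg"],  "small": ["~small.jpg"],
--             "medium": ["~medium.jpg"], "large": ["~large.jpg"],
--             "orig":   ["~orig.jpg"],
--         }.get(alt, []):
--             for u in urls:
--                 if u.endswith(m):
--                     return u
--     return fallback
-- ===== SOURCE B (Python) =====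
-- def _rank(suffixes, u):
--     for j, s in enumerate(suffixes):
--         if u.endswith(s):
--             return j
--     return None
--
--
-- def _pick_image_url(urls: list[str], size: str, fallback: str) -> str:
--     jpg = {"orig": "~orig.jpg", "large": "~large.jpg", "medium": "~medium.jpg",
--            "small": "~small.jpg", "thumb": "~thumb.jpg"}
--     png = {"orig": "~orig.png", "large": "~large.png", "medium": "~medium.png",
--            "small": "~small.png", "thumb": "~thumb.png"}
--     order = ["orig", "large", "medium", "small", "thumb"]
--     known = size in order
--     base = size if known else "medium"
--     tail = order[order.index(size):] if known else order
--     suffixes = [jpg[base], png[base]] + [jpg[alt] for alt in tail]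
--     best = None
--     for u in urls:
--         r = _rank(suffixes, u)
--         if r is not None and (best is None or r < best[0]):
--             best = (r, u)
--     return best[1] if best is not None else fallback
-- ===== Notes on version B (the rewrite author's own statement) =====
-- stated objective: alternative
-- what changed: Replaces A's two-phase suffix-major nested scans (for each marker, rescan all urls) by precomputing one ordered priority list of suffixes and making a single argmin pass over urls keyed by each url's first-matching-suffix rank.
import Mathlib
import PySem

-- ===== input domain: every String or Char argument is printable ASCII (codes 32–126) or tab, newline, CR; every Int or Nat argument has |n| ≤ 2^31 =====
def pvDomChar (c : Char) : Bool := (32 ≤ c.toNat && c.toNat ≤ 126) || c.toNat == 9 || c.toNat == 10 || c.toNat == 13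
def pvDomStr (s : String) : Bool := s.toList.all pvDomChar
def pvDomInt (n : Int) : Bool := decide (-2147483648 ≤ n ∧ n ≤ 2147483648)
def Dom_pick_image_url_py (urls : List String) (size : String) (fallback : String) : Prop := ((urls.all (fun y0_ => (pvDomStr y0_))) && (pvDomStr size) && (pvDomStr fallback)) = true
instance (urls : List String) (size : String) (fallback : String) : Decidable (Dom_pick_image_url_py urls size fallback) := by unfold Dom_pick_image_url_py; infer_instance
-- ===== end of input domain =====

-- B replaces A's two-phase suffix-major nested scans with a precomputed suffix-priority list
-- and a single argmin pass over urls (alternative decomposition, same asymptotic cost).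


-- ===== PORT A =====
-- first dict literal of A
def pvA_dict1 : PySem.Dict String (List String) :=
  PySem.Dict.ofList [("thumb", ["~thumb.jpg", "~thumb.png"]), ("small", ["~small.jpg", "~small.png"]),
   ("medium", ["~medium.jpg", "~medium.png"]), ("large", ["~large.jpg", "~large.png"]),
   ("orig", ["~orig.jpg", "~orig.png"])]

-- second dict literal of A (inside the fallback loop)
def pvA_dict2 : PySem.Dict String (List String) :=
  PySem.Dict.ofList [("thumb", ["~thumb.jpg"]), ("small", ["~small.jpg"]), ("medium", ["~medium.jpg"]),
   ("large", ["~large.jpg"]), ("orig", ["~orig.jpg"])]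

-- 'for m in ms: for u in urls: if u.endswith(m): return u' (inner loop = first match)
def pvA_scan (ms : List String) (urls : List String) : Option String :=
  match ms with
  | [] => none
  | m :: rest =>
    match urls.find? (fun u => PySem.Str.endswith u m) with
    | some u => some u
    | none => pvA_scan rest urls

-- the descending-fallback loop over alts
def pvA_phase2 (alts : List String) (urls : List String) : Option String :=
  match alts with
  | [] => none
  | alt :: rest =>
    match pvA_scan (PySem.Dict.getD pvA_dict2 alt []) urls with
    | some u => some u
    | none => pvA_phase2 rest urls

def pick_image_url_py (urls : List String) (size : String) (fallback : String) : String :=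
  let markers := PySem.Dict.getD pvA_dict1 size ["~medium.jpg", "~medium.png"]
  match pvA_scan markers urls with
  | some u => u
  | none =>
    let order : List String := ["orig", "large", "medium", "small", "thumb"]
    -- 'order[order.index(size):] if size in order else order'; .index is guarded by membership,
    -- so List.idxOf + drop is exact here
    let alts := if order.contains size then order.drop (order.idxOf size) else order
    match pvA_phase2 alts urls with
    | some u => u
    | none => fallback

-- ===== PORT B =====
-- Source B's _rank: index of the first suffix u ends with
def pvB_rank (suffixes : List String) (u : String) : Option Nat :=
  match suffixes with
  | [] => none
  | s :: rest =>
    if PySem.Str.endswith u s then some 0 else (pvB_rank rest u).map (· + 1)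

-- Source B's loop body: keep the (rank, url) with the smallest rank, first url wins ties
def pvB_step (rank : String → Option Nat) (best : Option (Nat × String)) (u : String) :
    Option (Nat × String) :=
  match rank u with
  | none => best
  | some r =>
    match best with
    | none => some (r, u)
    | some (br, bu) => if r < br then (r, u) else (br, bu)

def pvB_jpg : PySem.Dict String String :=
  PySem.Dict.ofList [("orig", "~orig.jpg"), ("large", "~large.jpg"), ("medium", "~medium.jpg"),
   ("small", "~small.jpg"), ("thumb", "~thumb.jpg")]

def pvB_png : PySem.Dict String String :=
  PySem.Dict.ofList [("orig", "~orig.png"), ("large", "~large.png"), ("medium", "~medium.png"),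
   ("small", "~small.png"), ("thumb", "~thumb.png")]

def pick_image_url_py_alt (urls : List String) (size : String) (fallback : String) : String :=
  let order : List String := ["orig", "large", "medium", "small", "thumb"]
  let known := order.contains size
  let base := if known then size else "medium"
  let tail := if known then order.drop (order.idxOf size) else order
  -- jpg[base]/png[base] never raise (base is always a key); getD with "" is the exact lookup
  let suffixes := PySem.Dict.getD pvB_jpg base "" :: PySem.Dict.getD pvB_png base "" ::
    tail.map (fun a => PySem.Dict.getD pvB_jpg a "")
  let best := urls.foldl (pvB_step (pvB_rank suffixes)) none
  match best with
  | some (_, u) => u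
  | none => fallback

-- ===== PRECONDITION & SPEC =====
def Spec_pick_image_url_py (urls : List String) (size : String) (fallback : String) (out : String) : Prop := out = pick_image_url_py_alt urls size fallback
instance (urls : List String) (size : String) (fallback : String) (out : String) : Decidable (Spec_pick_image_url_py urls size fallback out) := by unfold Spec_pick_image_url_py; infer_instance

-- ===== CLAIM (what is proved, stated in full; the proofs are below) =====
def Claim_equal_pick_image_url_py : Prop := ∀ (urls : List String) (size : String) (fallback : String), Dom_pick_image_url_py urls size fallback → Spec_pick_image_url_py urls size fallback (pick_image_url_py urls size fallback)

-- ===== LEMMAS AND PROOFS =====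

-- once a rank-0 best is held, the fold never replaces it
theorem pvB_fold_keep_zero (rank : String → Option Nat) (urls : List String) (bu : String) :
    urls.foldl (pvB_step rank) (some (0, bu)) = some (0, bu) := by
  induction urls with
  | nil => rfl
  | cons u rest ih =>
    simp only [List.foldl_cons, pvB_step]
    cases rank u with
    | none => exact ih
    | some r => simpa [pvB_step] using ih

-- if some url matches the head suffix, the fold returns the first such url with rank 0
theorem pvB_fold_zero (p : String → Bool) (rank : String → Option Nat)
    (h0 : ∀ u, p u = true → rank u = some 0)
    (h1 : ∀ u r, p u = false → rank u = some r → 0 < r) :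
    ∀ (urls : List String) (acc : Option (Nat × String)) (u0 : String),
    (acc = none ∨ ∃ x, acc = some x ∧ 0 < x.1) →
    urls.find? p = some u0 →
    urls.foldl (pvB_step rank) acc = some (0, u0) := by
  intro urls
  induction urls with
  | nil => intro acc u0 _ h; simp at h
  | cons u rest ih =>
    intro acc u0 hacc hfind
    by_cases hp : p u = true
    · rw [List.find?_cons_of_pos hp] at hfind
      injection hfind with h; subst h
      simp only [List.foldl_cons, pvB_step, h0 u hp]
      rcases hacc with h | ⟨⟨br, bu⟩, h, hbr⟩
      · subst h; exact pvB_fold_keep_zero rank rest u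
      · subst h
        simp only [hbr]
        exact pvB_fold_keep_zero rank rest u
    · have hp' : p u = false := by simpa using hp
      rw [List.find?_cons_of_neg hp] at hfind
      simp only [List.foldl_cons]
      apply ih _ u0 _ hfind
      simp only [pvB_step]
      cases hr : rank u with
      | none => exact hacc
      | some r =>
        have hrpos := h1 u r hp' hr
        rcases hacc with h | ⟨⟨br, bu⟩, h, hbr⟩
        · subst h; right; exact ⟨(r, u), rfl, hrpos⟩
        · subst h
          by_cases hlt : r < br
          · simp only [if_pos hlt]; right; exact ⟨(r, u), rfl, hrpos⟩
          · simp only [if_neg hlt]; right; exact ⟨(br, bu), rfl, hbr⟩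

-- shifting every rank by one does not change which element the fold picks
theorem pvB_fold_shift (rank rank' : String → Option Nat) :
    ∀ (urls : List String) (acc : Option (Nat × String)),
    (∀ u ∈ urls, rank' u = (rank u).map (· + 1)) →
    urls.foldl (pvB_step rank') (acc.map (fun x => (x.1 + 1, x.2))) =
      (urls.foldl (pvB_step rank) acc).map (fun x => (x.1 + 1, x.2)) := by
  intro urls
  induction urls with
  | nil => intro acc _; rfl
  | cons u rest ih =>
    intro acc hsh
    have hu : rank' u = (rank u).map (· + 1) := hsh u (by simp)
    have hrest : ∀ v ∈ rest, rank' v = (rank v).map (· + 1) :=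
      fun v hv => hsh v (by simp [hv])
    simp only [List.foldl_cons]
    have hstep : pvB_step rank' (acc.map (fun x => (x.1 + 1, x.2))) u =
        (pvB_step rank acc u).map (fun x => (x.1 + 1, x.2)) := by
      simp only [pvB_step, hu]
      cases rank u with
      | none => rfl
      | some r =>
        cases acc with
        | none => rfl
        | some x =>
          rcases x with ⟨br, bu⟩
          simp only [Option.map_some]
          by_cases hlt : r < br
          · simp [hlt]
          · simp [hlt]
    rw [hstep, ih (pvB_step rank acc u) hrest]

-- with no suffixes the fold keeps its accumulator
theorem pvB_fold_none (urls : List String) :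
    ∀ acc, urls.foldl (pvB_step (pvB_rank [])) acc = acc := by
  induction urls with
  | nil => intro acc; rfl
  | cons u rest ih => intro acc; simp only [List.foldl_cons, pvB_step, pvB_rank]; exact ih acc

-- core equivalence: A's suffix-major scan = B's argmin fold over urls
theorem scan_eq_fold (S : List String) (urls : List String) :
    pvA_scan S urls = (urls.foldl (pvB_step (pvB_rank S)) none).map Prod.snd := by
  induction S with
  | nil => simp [pvA_scan, pvB_fold_none]
  | cons s S' ih =>
    by_cases hf : ∃ u0, urls.find? (fun u => PySem.Str.endswith u s) = some u0
    · rcases hf with ⟨u0, hu0⟩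
      have hfold := pvB_fold_zero (fun u => PySem.Str.endswith u s) (pvB_rank (s :: S'))
        (fun u hp => by
          have hp' : PySem.Str.endswith u s = true := hp
          simp only [pvB_rank, hp', if_true])
        (fun u r hp hr => by
          have hp' : PySem.Str.endswith u s = false := hp
          simp only [pvB_rank, hp', Bool.false_eq_true, if_false] at hr
          rcases Option.map_eq_some_iff.mp hr with ⟨k, _, hk⟩
          omega)
        urls none u0 (Or.inl rfl) hu0
      simp only [pvA_scan]
      rw [hu0, hfold]
      rfl
    · have hnone : urls.find? (fun u => PySem.Str.endswith u s) = none := by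
        cases h : urls.find? (fun u => PySem.Str.endswith u s) with
        | none => rfl
        | some u => exact absurd ⟨u, h⟩ hf
      have hsh : ∀ u ∈ urls, pvB_rank (s :: S') u = (pvB_rank S' u).map (· + 1) := by
        intro u hu
        have hpf : PySem.Str.endswith u s = false := by
          have := List.find?_eq_none.mp hnone u hu
          simpa using this
        simp only [pvB_rank, hpf, Bool.false_eq_true, if_false]
      have hshift := pvB_fold_shift (pvB_rank S') (pvB_rank (s :: S')) urls none hsh
      simp only [Option.map_none] at hshift
      simp only [pvA_scan]
      rw [hnone, ih, hshift, Option.map_map]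
      rfl

-- A's two phases concatenate into one scan
theorem pvA_scan_append (S1 S2 : List String) (urls : List String) :
    pvA_scan (S1 ++ S2) urls =
      match pvA_scan S1 urls with
      | some u => some u
      | none => pvA_scan S2 urls := by
  induction S1 with
  | nil => simp [pvA_scan]
  | cons m rest ih =>
    simp only [List.cons_append, pvA_scan]
    cases urls.find? (fun u => PySem.Str.endswith u m) with
    | some u => rfl
    | none => exact ih

-- the fallback loop is a scan of the flattened per-alt marker lists
theorem pvA_phase2_eq (alts : List String) (urls : List String) :
    pvA_phase2 alts urls =
      pvA_scan (alts.flatMap (fun a => PySem.Dict.getD pvA_dict2 a [])) urls := by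
  induction alts with
  | nil => rfl
  | cons alt rest ih =>
    simp only [pvA_phase2, List.flatMap_cons, pvA_scan_append, ih]

-- A as one scan over the combined priority list
theorem pick_A_eq (urls : List String) (size fallback : String) :
    pick_image_url_py urls size fallback =
      match pvA_scan
          ((PySem.Dict.getD pvA_dict1 size ["~medium.jpg", "~medium.png"]) ++
            ((if (["orig", "large", "medium", "small", "thumb"] : List String).contains size
              then (["orig", "large", "medium", "small", "thumb"] : List String).drop
                ((["orig", "large", "medium", "small", "thumb"] : List String).idxOf size)
              else ["orig", "large", "medium", "small", "thumb"]).flatMap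
              (fun a => PySem.Dict.getD pvA_dict2 a []))) urls with
      | some u => u
      | none => fallback := by
  rw [pvA_scan_append]
  simp only [pick_image_url_py, pvA_phase2_eq]
  cases pvA_scan (PySem.Dict.getD pvA_dict1 size ["~medium.jpg", "~medium.png"]) urls with
  | some u => rfl
  | none => rfl

-- B as the argmin fold over the same shape of priority list
theorem pick_B_eq (urls : List String) (size fallback : String) :
    pick_image_url_py_alt urls size fallback =
      match (urls.foldl (pvB_step (pvB_rank
          (PySem.Dict.getD pvB_jpg (if (["orig", "large", "medium", "small", "thumb"] : List String).contains size then size else "medium") "" ::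
           PySem.Dict.getD pvB_png (if (["orig", "large", "medium", "small", "thumb"] : List String).contains size then size else "medium") "" ::
           (if (["orig", "large", "medium", "small", "thumb"] : List String).contains size
            then (["orig", "large", "medium", "small", "thumb"] : List String).drop
              ((["orig", "large", "medium", "small", "thumb"] : List String).idxOf size)
            else ["orig", "large", "medium", "small", "thumb"]).map
             (fun a => PySem.Dict.getD pvB_jpg a "")))) none).map Prod.snd with
      | some u => u
      | none => fallback := by
  simp only [pick_image_url_py_alt]
  generalize urls.foldl _ none = best
  cases best with
  | none => rfl
  | some x => rfl

-- for every size, the two priority lists coincide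
theorem suffix_lists_eq (size : String) :
    (PySem.Dict.getD pvA_dict1 size ["~medium.jpg", "~medium.png"]) ++
      ((if (["orig", "large", "medium", "small", "thumb"] : List String).contains size
        then (["orig", "large", "medium", "small", "thumb"] : List String).drop
          ((["orig", "large", "medium", "small", "thumb"] : List String).idxOf size)
        else ["orig", "large", "medium", "small", "thumb"]).flatMap
        (fun a => PySem.Dict.getD pvA_dict2 a [])) =
    PySem.Dict.getD pvB_jpg (if (["orig", "large", "medium", "small", "thumb"] : List String).contains size then size else "medium") "" ::
    PySem.Dict.getD pvB_png (if (["orig", "large", "medium", "small", "thumb"] : List String).contains size then size else "medium") "" ::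
    (if (["orig", "large", "medium", "small", "thumb"] : List String).contains size
     then (["orig", "large", "medium", "small", "thumb"] : List String).drop
       ((["orig", "large", "medium", "small", "thumb"] : List String).idxOf size)
     else ["orig", "large", "medium", "small", "thumb"]).map
      (fun a => PySem.Dict.getD pvB_jpg a "") := by
  by_cases h1 : size = "orig"; · subst h1; decide
  by_cases h2 : size = "large"; · subst h2; decide
  by_cases h3 : size = "medium"; · subst h3; decide
  by_cases h4 : size = "small"; · subst h4; decide
  by_cases h5 : size = "thumb"; · subst h5; decide
  have hc : (["orig", "large", "medium", "small", "thumb"] : List String).contains size = false := by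
    simp [List.contains_eq_mem, h1, h2, h3, h4, h5]
  have hd1 : PySem.Dict.getD pvA_dict1 size ["~medium.jpg", "~medium.png"] =
      ["~medium.jpg", "~medium.png"] := by
    have hit : pvA_dict1.items =
        [("thumb", ["~thumb.jpg", "~thumb.png"]), ("small", ["~small.jpg", "~small.png"]),
         ("medium", ["~medium.jpg", "~medium.png"]), ("large", ["~large.jpg", "~large.png"]),
         ("orig", ["~orig.jpg", "~orig.png"])] := by decide
    have b1 : (("orig" : String) == size) = false := by simp [Ne.symm h1]
    have b2 : (("large" : String) == size) = false := by simp [Ne.symm h2]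
    have b3 : (("medium" : String) == size) = false := by simp [Ne.symm h3]
    have b4 : (("small" : String) == size) = false := by simp [Ne.symm h4]
    have b5 : (("thumb" : String) == size) = false := by simp [Ne.symm h5]
    simp [PySem.Dict.getD, PySem.Dict.get?, hit, List.find?, b1, b2, b3, b4, b5]
  rw [hc, hd1]
  simp only [Bool.false_eq_true, if_false]
  decide

-- ===== VERDICT (by name: the statement is the Claim_ definition above) =====
theorem pick_image_url_py_spec : Claim_equal_pick_image_url_py := by
  intro urls size fallback _
  unfold Spec_pick_image_url_py
  rw [pick_A_eq, pick_B_eq, ← scan_eq_fold, suffix_lists_eq]
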